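-- pv_equiv track=rewrite | github.com/Joaopedrosiemon/agentemdfsistema | src/services/smart_alternatives_service.py | _finishes_compatible
-- ===== SOURCE A (Python) =====
-- FINISH_GROUPS = [
--     {"design", "essencial", "nature", "natura"},
--     {"matt", "soft", "supermatte", "acetinatta"},
--     {"chess", "trama", "pele"},
--     {"lacca", "liso"},
--     {"silk", "linho"},
-- ]
--
-- def _finishes_compatible(finish_a: str, finish_b: str) -> bool:
--     """Check if two finishes are in the same family."""
--     a_lower = finish_a.lower()
--     b_lower = finish_b.lower()
--     for group in FINISH_GROUPS:
--         a_in = any(kw in a_lower for kw in group)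
--         b_in = any(kw in b_lower for kw in group)
--         if a_in and b_in:
--             return True
--     return False
-- ===== SOURCE B (Python) =====
-- FINISH_GROUPS = [
--     {"design", "essencial", "nature", "natura"},
--     {"matt", "soft", "supermatte", "acetinatta"},
--     {"chess", "trama", "pele"},
--     {"lacca", "liso"},
--     {"silk", "linho"},
-- ]
--
-- # keyword -> group index (keywords are distinct across groups), and the distinct keyword lengths
-- _KW_GROUP = {kw: i for i, group in enumerate(FINISH_GROUPS) for kw in group}
-- _KW_LENGTHS = sorted({len(kw) for kw in _KW_GROUP})
--
--
-- def _group_mask(finish: str) -> int: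
--     """Bitmask of finish families: slide a window of each keyword length over the
--     lowered string and look the window up in the keyword table (no substring search)."""
--     s = finish.lower()
--     mask = 0
--     for length in _KW_LENGTHS:
--         for start in range(len(s) - length + 1):
--             g = _KW_GROUP.get(s[start:start + length])
--             if g is not None:
--                 mask |= 1 << g
--     return mask
--
--
-- def _finishes_compatible(finish_a: str, finish_b: str) -> bool:
--     """Check if two finishes are in the same family."""
--     return (_group_mask(finish_a) & _group_mask(finish_b)) != 0
-- ===== Notes on version B (the rewrite author's own statement) =====
-- stated objective: alternative
-- what changed: B replaces the per-group substring searches ('kw in s') with a hash-table scan: it builds a keyword->group dict once, slides a window of each keyword length over each lowered string looking windows up in the dict to build a bitmask of matched families per string, and returns whether the two bitmasks intersect.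
import Mathlib
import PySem

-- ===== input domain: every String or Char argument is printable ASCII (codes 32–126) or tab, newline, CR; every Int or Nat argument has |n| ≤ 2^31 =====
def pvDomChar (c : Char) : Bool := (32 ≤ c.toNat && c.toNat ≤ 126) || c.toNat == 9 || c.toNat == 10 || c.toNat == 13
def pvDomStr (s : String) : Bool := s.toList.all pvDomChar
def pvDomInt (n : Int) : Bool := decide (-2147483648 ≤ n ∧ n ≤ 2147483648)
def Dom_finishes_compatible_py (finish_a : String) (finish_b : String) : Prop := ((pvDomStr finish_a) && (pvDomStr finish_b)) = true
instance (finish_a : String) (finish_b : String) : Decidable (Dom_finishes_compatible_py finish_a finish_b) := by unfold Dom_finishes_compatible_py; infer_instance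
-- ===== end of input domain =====

-- B replaces A's per-group substring searches by a keyword->group hash table scanned with
-- sliding windows of each keyword length, combining the matched families into bitmasks
-- that are intersected ('alternative': different algorithm, similar cost).

-- ===== PORT A =====
-- the module constant FINISH_GROUPS (Python set literals of distinct keywords, kept in literal order;
-- set iteration order cannot affect the 'any' results)
def pvFinishGroups : List (List String) :=
  [["design", "essencial", "nature", "natura"],
   ["matt", "soft", "supermatte", "acetinatta"],
   ["chess", "trama", "pele"],
   ["lacca", "liso"],
   ["silk", "linho"]]

-- the for-loop over FINISH_GROUPS with its early 'return True'
def pvLoopA (a_lower : String) (b_lower : String) : List (List String) → Bool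
  | [] => false
  | group :: rest =>
    let a_in := group.any (fun kw => PySem.Str.isIn kw a_lower)
    let b_in := group.any (fun kw => PySem.Str.isIn kw b_lower)
    if a_in && b_in then true else pvLoopA a_lower b_lower rest

def finishes_compatible_py (finish_a : String) (finish_b : String) : Bool :=
  pvLoopA (PySem.Str.lower finish_a) (PySem.Str.lower finish_b) pvFinishGroups

-- ===== PORT B =====
-- _KW_GROUP: keyword -> group index (keywords are distinct across groups, so the dict
-- comprehension yields this table regardless of set iteration order); keys as char lists
def pvKwGroup : PySem.Dict (List Char) Nat := PySem.Dict.mk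
  [("design".toList, 0), ("essencial".toList, 0), ("nature".toList, 0), ("natura".toList, 0),
   ("matt".toList, 1), ("soft".toList, 1), ("supermatte".toList, 1), ("acetinatta".toList, 1),
   ("chess".toList, 2), ("trama".toList, 2), ("pele".toList, 2),
   ("lacca".toList, 3), ("liso".toList, 3),
   ("silk".toList, 4), ("linho".toList, 4)]

-- _KW_LAYOUTS = sorted({len(kw) for kw in _KW_GROUP})
def pvKwLengths : List Nat := [4, 5, 6, 9, 10]

-- inner loop 'for start in range(len(s) - length + 1)' (Python's empty range for a
-- negative bound is exactly Nat truncated subtraction here); the window s[start:start+length]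
-- is PySem.List.slice with the non-negative bounds start, start+length
def pvMaskLen (s : List Char) (length : Nat) (mask : Nat) : Nat :=
  (List.range (s.length + 1 - length)).foldl
    (fun (m : Nat) (start : Nat) =>
      match pvKwGroup.get? (PySem.List.slice s (some (start : Int)) (some ((start : Int) + (length : Int)))) with
      | some g => m ||| (1 <<< g)      -- mask |= 1 << g
      | none => m) mask

-- _group_mask
def pvGroupMask (finish : String) : Nat :=
  let s := PySem.Chars.lower finish.toList
  pvKwLengths.foldl (fun mask length => pvMaskLen s length mask) 0

def finishes_compatible_py_alt (finish_a : String) (finish_b : String) : Bool :=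
  (pvGroupMask finish_a &&& pvGroupMask finish_b) != 0

-- ===== PRECONDITION & SPEC =====
def Spec_finishes_compatible_py (finish_a : String) (finish_b : String) (out : Bool) : Prop := out = finishes_compatible_py_alt finish_a finish_b
instance (finish_a : String) (finish_b : String) (out : Bool) : Decidable (Spec_finishes_compatible_py finish_a finish_b out) := by unfold Spec_finishes_compatible_py; infer_instance

-- ===== CLAIM (what is proved, stated in full; the proofs are below) =====
def Claim_equal_finishes_compatible_py : Prop := ∀ (finish_a : String) (finish_b : String), Dom_finishes_compatible_py finish_a finish_b → Spec_finishes_compatible_py finish_a finish_b (finishes_compatible_py finish_a finish_b)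

-- ===== LEMMAS AND PROOFS =====

-- the single window contribution to the mask (0 when the window misses the table)
def pvContrib (s : List Char) (length : Nat) (start : Nat) : Nat :=
  match pvKwGroup.get? ((s.drop start).take length) with
  | some g => 1 <<< g
  | none => 0

-- an OR-accumulating foldl splits off its initial accumulator
theorem pvOrFold_split (f : Nat → Nat) (xs : List Nat) : ∀ m : Nat,
    xs.foldl (fun a x => a ||| f x) m = m ||| xs.foldl (fun a x => a ||| f x) 0 := by
  induction xs with
  | nil => intro m; simp
  | cons x xs ih =>
    intro m
    simp only [List.foldl_cons, Nat.zero_or]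
    rw [ih (m ||| f x), ih (f x), Nat.or_assoc]

theorem pvOrFold_testBit (f : Nat → Nat) (xs : List Nat) (i : Nat) :
    (xs.foldl (fun a x => a ||| f x) 0).testBit i = xs.any (fun x => (f x).testBit i) := by
  induction xs with
  | nil => simp
  | cons x xs ih =>
    simp only [List.foldl_cons, Nat.zero_or, List.any_cons]
    rw [pvOrFold_split, Nat.testBit_or, ih]

theorem pvMaskLen_eq (s : List Char) (L : Nat) (m : Nat) :
    pvMaskLen s L m = (List.range (s.length + 1 - L)).foldl (fun a st => a ||| pvContrib s L st) m := by
  unfold pvMaskLen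
  apply PySem.List.foldl_congr_mem
  intro a st _
  simp only [PySem.List.slice_natCast_add]
  unfold pvContrib
  cases pvKwGroup.get? ((s.drop st).take L) <;> simp

theorem pvShiftOne_testBit (g i : Nat) : (1 <<< g).testBit i = decide (g = i) := by
  rw [Nat.one_shiftLeft]; simp [Nat.testBit_two_pow]

-- one window length: a bit of the per-length OR is set exactly when some table entry
-- with a key of that length and that group occurs in s
theorem pvHit_exists (s : List Char) (L i : Nat) :
    ((List.range (s.length + 1 - L)).any fun st => (pvContrib s L st).testBit i) = true
    ↔ ∃ p ∈ pvKwGroup.items, p.1.length = L ∧ p.2 = i ∧ PySem.Chars.isIn p.1 s = true := by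
  constructor
  · intro h
    rcases List.any_eq_true.mp h with ⟨st, hst, hbit⟩
    rcases hg : pvKwGroup.get? ((s.drop st).take L) with _ | g
    · simp [pvContrib, hg] at hbit
    · have hgi : g = i := by
        simp only [pvContrib, hg] at hbit
        rw [pvShiftOne_testBit] at hbit
        exact of_decide_eq_true hbit
      have hmem := PySem.Dict.mem_items_of_get?_eq_some pvKwGroup hg
      have hstlt : st < s.length + 1 - L := List.mem_range.mp hst
      have hlen : ((s.drop st).take L).length = L := by
        simp only [List.length_take, List.length_drop]
        omega
      refine ⟨_, hmem, hlen, hgi, ?_⟩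
      exact (PySem.Chars.exists_prefix_drop_iff_isIn _ _).mp ⟨st, List.take_prefix _ _⟩
  · rintro ⟨p, hp, hlen, hpi, hin⟩
    rcases (PySem.Chars.exists_prefix_drop_iff_isIn _ _).mpr hin with ⟨j, hpre⟩
    have hjlen : p.1.length ≤ s.length - j := by
      simpa using hpre.length_le
    have hpos : 0 < p.1.length := by
      have hall : ∀ q ∈ pvKwGroup.items, 0 < q.1.length := by decide
      exact hall p hp
    have hj : j < s.length + 1 - L := by omega
    apply List.any_eq_true.mpr
    refine ⟨j, List.mem_range.mpr hj, ?_⟩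
    have hwin : (s.drop j).take L = p.1 := by
      rw [← hlen]; exact (List.prefix_iff_eq_take.mp hpre).symm
    have hget : pvKwGroup.get? p.1 = some p.2 := by
      exact (PySem.Dict.get?_eq_some_iff_mem_items pvKwGroup p.1 p.2 (by decide)).mpr (by simpa using hp)
    simp [pvContrib, hwin, hget, hpi]

-- bit i of the whole mask: some table entry of group i occurs in s
theorem pvMask_testBit (s : List Char) (i : Nat) :
    (pvKwLengths.foldl (fun mask L => pvMaskLen s L mask) 0).testBit i
    = pvKwGroup.items.any (fun p => p.2 == i && PySem.Chars.isIn p.1 s) := by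
  have hfold : pvKwLengths.foldl (fun mask L => pvMaskLen s L mask) 0
      = pvKwLengths.foldl (fun a L => a ||| (List.range (s.length + 1 - L)).foldl (fun a st => a ||| pvContrib s L st) 0) 0 := by
    apply PySem.List.foldl_congr_mem
    intro a L _
    rw [pvMaskLen_eq, pvOrFold_split]
  rw [hfold, pvOrFold_testBit]
  apply Bool.eq_iff_iff.mpr
  rw [List.any_eq_true]
  constructor
  · rintro ⟨L, _, hL⟩
    rw [pvOrFold_testBit] at hL
    rcases (pvHit_exists s L i).mp hL with ⟨p, hp, _, hpi, hin⟩
    refine List.any_eq_true.mpr ⟨p, hp, ?_⟩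
    simp [hpi, hin]
  · intro h
    rcases List.any_eq_true.mp h with ⟨p, hp, hcond⟩
    rw [Bool.and_eq_true] at hcond
    obtain ⟨hpi, hin⟩ := hcond
    refine ⟨p.1.length, ?_, ?_⟩
    · revert hp
      have : ∀ q ∈ pvKwGroup.items, q.1.length ∈ pvKwLengths := by decide
      exact fun hp => this p hp
    · rw [pvOrFold_testBit]
      exact (pvHit_exists s p.1.length i).mpr ⟨p, hp, rfl, by simpa using hpi, hin⟩

-- the mask written out of the five family-match booleans
def pvBits (b0 b1 b2 b3 b4 : Bool) : Nat :=
  (cond b0 1 0) ||| (cond b1 2 0) ||| (cond b2 4 0) ||| (cond b3 8 0) ||| (cond b4 16 0)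

def pvHas (s : List Char) (kws : List String) : Bool :=
  kws.any fun kw => PySem.Chars.isIn kw.toList s

theorem pvBits_testBit0 (b0 b1 b2 b3 b4 : Bool) : (pvBits b0 b1 b2 b3 b4).testBit 0 = b0 := by
  cases b0 <;> cases b1 <;> cases b2 <;> cases b3 <;> cases b4 <;> decide
theorem pvBits_testBit1 (b0 b1 b2 b3 b4 : Bool) : (pvBits b0 b1 b2 b3 b4).testBit 1 = b1 := by
  cases b0 <;> cases b1 <;> cases b2 <;> cases b3 <;> cases b4 <;> decide
theorem pvBits_testBit2 (b0 b1 b2 b3 b4 : Bool) : (pvBits b0 b1 b2 b3 b4).testBit 2 = b2 := by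
  cases b0 <;> cases b1 <;> cases b2 <;> cases b3 <;> cases b4 <;> decide
theorem pvBits_testBit3 (b0 b1 b2 b3 b4 : Bool) : (pvBits b0 b1 b2 b3 b4).testBit 3 = b3 := by
  cases b0 <;> cases b1 <;> cases b2 <;> cases b3 <;> cases b4 <;> decide
theorem pvBits_testBit4 (b0 b1 b2 b3 b4 : Bool) : (pvBits b0 b1 b2 b3 b4).testBit 4 = b4 := by
  cases b0 <;> cases b1 <;> cases b2 <;> cases b3 <;> cases b4 <;> decide

theorem pvMask_eq (s : List Char) :
    pvKwLengths.foldl (fun mask L => pvMaskLen s L mask) 0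
    = pvBits (pvHas s ["design", "essencial", "nature", "natura"])
             (pvHas s ["matt", "soft", "supermatte", "acetinatta"])
             (pvHas s ["chess", "trama", "pele"])
             (pvHas s ["lacca", "liso"])
             (pvHas s ["silk", "linho"]) := by
  apply Nat.eq_of_testBit_eq
  intro i
  rw [pvMask_testBit]
  by_cases hi : i < 5
  · interval_cases i
    · rw [pvBits_testBit0]; simp [pvKwGroup, pvHas]
    · rw [pvBits_testBit1]; simp [pvKwGroup, pvHas]
    · rw [pvBits_testBit2]; simp [pvKwGroup, pvHas]
    · rw [pvBits_testBit3]; simp [pvKwGroup, pvHas]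
    · rw [pvBits_testBit4]; simp [pvKwGroup, pvHas]
  · have hlt : pvBits (pvHas s ["design", "essencial", "nature", "natura"])
        (pvHas s ["matt", "soft", "supermatte", "acetinatta"])
        (pvHas s ["chess", "trama", "pele"]) (pvHas s ["lacca", "liso"]) (pvHas s ["silk", "linho"]) < 32 := by
      unfold pvBits
      cases pvHas s ["design", "essencial", "nature", "natura"] <;>
        cases pvHas s ["matt", "soft", "supermatte", "acetinatta"] <;>
        cases pvHas s ["chess", "trama", "pele"] <;>
        cases pvHas s ["lacca", "liso"] <;>
        cases pvHas s ["silk", "linho"] <;> decide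
    rw [Nat.testBit_eq_false_of_lt (lt_of_lt_of_le hlt (by
      calc (32:Nat) = 2 ^ 5 := rfl
        _ ≤ 2 ^ i := Nat.pow_le_pow_right (by omega) (by omega)))]
    have h0 : (0 : Nat) ≠ i := by omega
    have h1 : (1 : Nat) ≠ i := by omega
    have h2 : (2 : Nat) ≠ i := by omega
    have h3 : (3 : Nat) ≠ i := by omega
    have h4 : (4 : Nat) ≠ i := by omega
    simp [pvKwGroup, h0, h1, h2, h3, h4]

-- the two bitmask intersection test as a Boolean formula of the ten family-match booleans
set_option maxHeartbeats 1000000 in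
theorem pvBits_inter (a0 a1 a2 a3 a4 b0 b1 b2 b3 b4 : Bool) :
    ((pvBits a0 a1 a2 a3 a4 &&& pvBits b0 b1 b2 b3 b4) != 0)
    = (if a0 && b0 then true else if a1 && b1 then true else if a2 && b2 then true
       else if a3 && b3 then true else if a4 && b4 then true else false) := by
  cases a0 <;> cases a1 <;> cases a2 <;> cases a3 <;> cases a4 <;>
    cases b0 <;> cases b1 <;> cases b2 <;> cases b3 <;> cases b4 <;> decide

-- ===== VERDICT (by name: the statement is the Claim_ definition above) =====
theorem finishes_compatible_py_spec : Claim_equal_finishes_compatible_py := by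
  intro fa fb _
  unfold Spec_finishes_compatible_py finishes_compatible_py finishes_compatible_py_alt pvGroupMask
  simp only []
  rw [pvMask_eq, pvMask_eq, pvBits_inter]
  simp [pvLoopA, pvFinishGroups, pvHas, PySem.Str.isIn, PySem.Str.toList_lower]
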